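-- pv_equiv track=rewrite | github.com/schavery/qup-optimizer | optimizer/layout_ops.py | rotate_position_around_center
-- ===== SOURCE A (Python) =====
-- from typing import Dict, List, Tuple, Set
--
-- def rotate_position_around_center(position: Tuple[int, int, int],
--                                    center: Tuple[int, int, int],
--                                    steps: int = 1) -> Tuple[int, int, int]:
--     """
--     Rotate a position around a center by N 60-degree steps (clockwise)
--
--     Args:
--         position: Position to rotate
--         center: Center of rotation
--         steps: Number of 60-degree clockwise rotations (1-5, or negative for CCW)
--
--     Returns:
--         New rotated position
--     """
--     # Translate to origin
--     q = position[0] - center[0]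
--     r = position[1] - center[1]
--     s = position[2] - center[2]
--
--     # Rotate using cube coordinate rotation
--     # Each step is 60 degrees clockwise
--     for _ in range(steps % 6):
--         q, r, s = -s, -q, -r
--
--     # Translate back
--     return (q + center[0], r + center[1], s + center[2])
-- ===== SOURCE B (Python) =====
-- def rotate_position_around_center(position, center, steps=1):
--     q = position[0] - center[0]
--     r = position[1] - center[1]
--     s = position[2] - center[2]
--     n = steps % 6
--     if n == 0:
--         q2, r2, s2 = q, r, s
--     elif n == 1:
--         q2, r2, s2 = -s, -q, -r
--     elif n == 2:
--         q2, r2, s2 = r, s, q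
--     elif n == 3:
--         q2, r2, s2 = -q, -r, -s
--     elif n == 4:
--         q2, r2, s2 = s, q, r
--     else:
--         q2, r2, s2 = -r, -s, -q
--     return (q2 + center[0], r2 + center[1], s2 + center[2])
-- ===== Notes on version B (the rewrite author's own statement) =====
-- stated objective: simpler
-- what changed: Replaces the iterative repeat-(steps%6)-times rotation loop with a direct closed-form signed-permutation table indexed by steps%6.
import Mathlib
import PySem

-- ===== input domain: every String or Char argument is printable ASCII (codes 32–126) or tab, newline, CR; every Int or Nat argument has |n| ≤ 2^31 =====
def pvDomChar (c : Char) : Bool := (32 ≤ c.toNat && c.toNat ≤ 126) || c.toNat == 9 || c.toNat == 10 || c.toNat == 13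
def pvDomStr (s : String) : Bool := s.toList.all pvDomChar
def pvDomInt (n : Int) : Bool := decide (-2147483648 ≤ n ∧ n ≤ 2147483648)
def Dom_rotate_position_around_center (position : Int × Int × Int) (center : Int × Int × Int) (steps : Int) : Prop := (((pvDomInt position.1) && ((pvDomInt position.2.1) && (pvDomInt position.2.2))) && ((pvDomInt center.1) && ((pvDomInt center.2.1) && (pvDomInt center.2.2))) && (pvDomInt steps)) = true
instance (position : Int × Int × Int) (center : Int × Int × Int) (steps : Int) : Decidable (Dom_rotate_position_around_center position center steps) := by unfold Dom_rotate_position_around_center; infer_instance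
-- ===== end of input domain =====

-- B replaces A's iterate-(steps%6)-times rotation loop with a direct signed-permutation table on steps%6 (simpler, closed form).


-- ===== PORT A =====
def rotate_position_around_center (position : Int × Int × Int) (center : Int × Int × Int) (steps : Int) : Int × Int × Int :=
  let q := position.1 - center.1
  let r := position.2.1 - center.2.1
  let s := position.2.2 - center.2.2
  let qrs := (PySem.List.pyRange 0 (PySem.Int.mod steps 6) 1).foldl
      (fun (st : Int × Int × Int) _ => (-st.2.2, -st.1, -st.2.1)) (q, r, s)
  (qrs.1 + center.1, qrs.2.1 + center.2.1, qrs.2.2 + center.2.2)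

-- ===== PORT B =====
-- B: closed-form signed-permutation table indexed by steps % 6 (no loop)
def rotate_position_around_center_alt (position : Int × Int × Int) (center : Int × Int × Int) (steps : Int) : Int × Int × Int :=
  let q := position.1 - center.1
  let r := position.2.1 - center.2.1
  let s := position.2.2 - center.2.2
  let n := PySem.Int.mod steps 6
  let qrs : Int × Int × Int :=
    if n = 0 then (q, r, s)
    else if n = 1 then (-s, -q, -r)
    else if n = 2 then (r, s, q)
    else if n = 3 then (-q, -r, -s)
    else if n = 4 then (s, q, r)
    else (-r, -s, -q)
  (qrs.1 + center.1, qrs.2.1 + center.2.1, qrs.2.2 + center.2.2)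

-- ===== PRECONDITION & SPEC =====
def Spec_rotate_position_around_center (position : Int × Int × Int) (center : Int × Int × Int) (steps : Int) (out : Int × Int × Int) : Prop := out = rotate_position_around_center_alt position center steps
instance (position : Int × Int × Int) (center : Int × Int × Int) (steps : Int) (out : Int × Int × Int) : Decidable (Spec_rotate_position_around_center position center steps out) := by unfold Spec_rotate_position_around_center; infer_instance

-- ===== CLAIM (what is proved, stated in full; the proofs are below) =====
def Claim_equal_rotate_position_around_center : Prop := ∀ (position : Int × Int × Int) (center : Int × Int × Int) (steps : Int), Dom_rotate_position_around_center position center steps → Spec_rotate_position_around_center position center steps (rotate_position_around_center position center steps)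

-- ===== LEMMAS AND PROOFS =====
lemma pvRange0 : PySem.List.pyRange 0 0 1 = [] := by decide
lemma pvRange1 : PySem.List.pyRange 0 1 1 = [0] := by decide
lemma pvRange2 : PySem.List.pyRange 0 2 1 = [0, 1] := by decide
lemma pvRange3 : PySem.List.pyRange 0 3 1 = [0, 1, 2] := by decide
lemma pvRange4 : PySem.List.pyRange 0 4 1 = [0, 1, 2, 3] := by decide
lemma pvRange5 : PySem.List.pyRange 0 5 1 = [0, 1, 2, 3, 4] := by decide

-- ===== VERDICT (by name: the statement is the Claim_ definition above) =====
theorem rotate_position_around_center_spec : Claim_equal_rotate_position_around_center := by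
  intro position center steps _
  unfold Spec_rotate_position_around_center rotate_position_around_center rotate_position_around_center_alt
  have h0 : 0 ≤ PySem.Int.mod steps 6 := PySem.Int.mod_nonneg steps (by norm_num)
  have h6 : PySem.Int.mod steps 6 < 6 := PySem.Int.mod_lt steps (by norm_num)
  have hcase : PySem.Int.mod steps 6 = 0 ∨ PySem.Int.mod steps 6 = 1 ∨ PySem.Int.mod steps 6 = 2 ∨
      PySem.Int.mod steps 6 = 3 ∨ PySem.Int.mod steps 6 = 4 ∨ PySem.Int.mod steps 6 = 5 := by omega
  rcases hcase with h | h | h | h | h | h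
  · rw [h, pvRange0]; simp
  · rw [h, pvRange1]; simp [List.foldl]
  · rw [h, pvRange2]; simp [List.foldl]
  · rw [h, pvRange3]; simp [List.foldl]
  · rw [h, pvRange4]; simp [List.foldl]
  · rw [h, pvRange5]; simp [List.foldl]
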